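-- pv_equiv track=rewrite | github.com/AB-IN-lsy/VSCode | ACM/NIU KE (competition)/c.py | stringGame
-- ===== SOURCE A (Python) =====
-- def stringGame(s):
--     # Write your code here.
--     lst=[]
--     import string
--     tmp=string.ascii_lowercase
--     for i in tmp:
--         a=s.count(i)
--         if a!=0:
--             lst.append(a)
--     a=lst.count(lambda x: x%2==0)
--     b=len(lst)-a
--     if b&1:
--         flag=1
--     else:
--         flag=0
--     if a&1:
--         if flag==1:
--             return False
--         else:
--             return True
--     else:
--         if flag==1:
--             return True
--         else:
--             return False
-- ===== SOURCE B (Python) =====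
-- import string
--
--
-- def stringGame(s):
--     # Parity of the number of distinct lowercase letters present in s.
--     # (In A, lst.count(lambda ...) is always 0, so A returns True iff
--     # len(lst) -- the number of distinct lowercase letters -- is odd.)
--     present = {c for c in s if c in string.ascii_lowercase}
--     return len(present) % 2 == 1
-- ===== Notes on version B (the rewrite author's own statement) =====
-- stated objective: simpler
-- what changed: B builds the set of distinct lowercase letters of s in one pass and returns whether its size is odd, replacing A's 26 full scans of s, the frequency list and the dead parity branches (A's lst.count(lambda ...) is always 0).
import Mathlib
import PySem

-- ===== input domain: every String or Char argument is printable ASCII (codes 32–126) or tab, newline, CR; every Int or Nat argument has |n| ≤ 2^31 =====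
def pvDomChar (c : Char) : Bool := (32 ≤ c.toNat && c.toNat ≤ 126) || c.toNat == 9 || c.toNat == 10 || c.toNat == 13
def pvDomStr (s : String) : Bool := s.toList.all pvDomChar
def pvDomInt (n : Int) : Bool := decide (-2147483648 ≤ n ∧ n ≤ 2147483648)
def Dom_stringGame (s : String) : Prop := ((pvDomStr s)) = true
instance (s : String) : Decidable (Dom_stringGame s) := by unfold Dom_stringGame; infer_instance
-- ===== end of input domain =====

-- B computes the set of distinct lowercase letters present in s directly and tests its
-- parity, replacing A's 26 scans, frequency list and dead parity branches (objective: simpler).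

-- ===== PORT A =====
-- string.ascii_lowercase
def pvAlphabet : List Char := "abcdefghijklmnopqrstuvwxyz".toList

def stringGame (s : String) : Bool :=
  let lst : List Int :=
    pvAlphabet.foldl (fun lst i =>
      let a : Int := (PySem.Chars.count s.toList [i] : Int)  -- a = s.count(i)
      if a ≠ 0 then lst ++ [a] else lst) []
  -- a = lst.count(lambda x: x%2==0): a function object equals no int, so the count is 0 (exact)
  let a : Int := 0
  let b : Int := (lst.length : Int) - a
  -- 'if b&1:' — here b ≥ 0, so bitwise-and with 1 is b % 2 (exact)
  let flag : Int := if b % 2 ≠ 0 then 1 else 0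
  if a % 2 ≠ 0 then
    if flag = 1 then false else true
  else
    if flag = 1 then true else false

-- ===== PORT B =====
def stringGame_alt (s : String) : Bool :=
  -- 'c in string.ascii_lowercase' for the single char c is list membership (exact)
  let present : PySem.Set Char :=
    PySem.Set.ofList (s.toList.filter (fun c => pvAlphabet.contains c))
  present.length % 2 == 1

-- ===== PRECONDITION & SPEC =====
def Spec_stringGame (s : String) (out : Bool) : Prop := out = stringGame_alt s
instance (s : String) (out : Bool) : Decidable (Spec_stringGame s out) := by unfold Spec_stringGame; infer_instance

-- ===== CLAIM (what is proved, stated in full; the proofs are below) =====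
def Claim_equal_stringGame : Prop := ∀ (s : String), Dom_stringGame s → Spec_stringGame s (stringGame s)

-- ===== LEMMAS AND PROOFS =====

-- Chars.count with a single-character needle is List.count (go never skips: drop 1 each step).
theorem pvCountGo_singleton (c : Char) :
    ∀ (fuel : Nat) (l : List Char) (acc : Nat), l.length ≤ fuel →
      PySem.Chars.count.go [c] fuel l acc = acc + l.count c := by
  intro fuel
  induction fuel with
  | zero =>
    intro l acc h
    have : l = [] := List.length_eq_zero_iff.mp (Nat.le_zero.mp h)
    subst this
    simp [PySem.Chars.count.go]
  | succ n ih =>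
    intro l acc h
    cases l with
    | nil => simp [PySem.Chars.count.go]
    | cons x t =>
      by_cases hx : x = c
      · subst hx
        have hpre : List.isPrefixOf [x] (x :: t) = true := by
          simp [List.isPrefixOf]
        rw [PySem.Chars.count.go, if_pos hpre]
        simp only [List.length_singleton, List.drop_succ_cons, List.drop_zero]
        rw [ih t (acc + 1) (by simpa using Nat.lt_succ_iff.mp (by simpa using h))]
        simp
        omega
      · have hpre : List.isPrefixOf [c] (x :: t) = false := by
          simp [List.isPrefixOf]
          exact fun hc => (hx hc.symm).elim
        rw [PySem.Chars.count.go, if_neg (by simp [hpre])]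
        rw [ih t acc (by simpa using Nat.lt_succ_iff.mp (by simpa using h))]
        simp [hx]

theorem pvCount_singleton (l : List Char) (c : Char) :
    PySem.Chars.count l [c] = l.count c := by
  have h := pvCountGo_singleton c l.length l 0 (le_refl _)
  simp [PySem.Chars.count, h]

theorem pvAlphabet_nodup : pvAlphabet.Nodup := by decide

-- the two letter lists are a permutation of each other, so their lengths agree
theorem pvLength_eq (s : String) :
    (pvAlphabet.filter (fun i => s.toList.count i ≠ 0)).length
      = (PySem.Set.ofList (s.toList.filter (fun c => pvAlphabet.contains c))).length := by
  apply List.Perm.length_eq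
  apply (List.perm_ext_iff_of_nodup _ _).mpr
  · intro x
    simp only [List.mem_filter, PySem.Set.mem_ofList, decide_eq_true_eq,
      List.contains_iff_mem, ne_eq, List.count_eq_zero]
    constructor
    · rintro ⟨hx, hs⟩
      exact ⟨not_not.mp (by simpa using hs), hx⟩
    · rintro ⟨hs, hx⟩
      exact ⟨hx, by simpa using hs⟩
  · exact pvAlphabet_nodup.filter _
  · exact PySem.Set.nodup_ofList _

-- ===== VERDICT (by name: the statement is the Claim_ definition above) =====
theorem stringGame_spec : Claim_equal_stringGame := by
  intro s _
  unfold Spec_stringGame stringGame stringGame_alt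
  simp only [pvCount_singleton]
  rw [PySem.List.foldl_append_ite (p := fun i => ((s.toList.count i : Int)) ≠ 0)
      (f := fun i => ((s.toList.count i : Int)))]
  simp only [List.nil_append, List.length_map]
  have hflt : (pvAlphabet.filter fun i => decide (((s.toList.count i : Int)) ≠ 0))
      = pvAlphabet.filter (fun i => s.toList.count i ≠ 0) := by
    apply List.filter_congr
    intro x _
    simp
  rw [hflt, pvLength_eq s]
  set n := (PySem.Set.ofList (s.toList.filter (fun c => pvAlphabet.contains c))).length with hn
  split_ifs <;> simp_all <;> omega
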